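-- pv_equiv track=rewrite | github.com/gratus907/20WBasicComputing | January 7/7-3.py | check
-- ===== SOURCE A (Python) =====
-- def check(hidden, guess):
--     st = 0
--     ba = 0
--     for i in range(3):
--         if hidden[i] == guess[i]:
--             st += 1
--         elif guess[i] in hidden:
--             ba += 1
--     return st, ba
-- ===== SOURCE B (Python) =====
-- def check(hidden, guess):
--     hidden_set = set(hidden)
--     def go(hs, gs, k):
--         if k == 0:
--             return (0, 0)
--         st, ba = go(hs[1:], gs[1:], k - 1)
--         if hs[0] == gs[0]:
--             return (st + 1, ba)
--         if gs[0] in hidden_set: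
--             return (st, ba + 1)
--         return (st, ba)
--     return go(hidden, guess, 3)
-- ===== Notes on version B (the rewrite author's own statement) =====
-- stated objective: alternative
-- what changed: Replaces the iterative index loop over range(3) with a structural recursion over the paired list heads that accumulates the counts back-to-front on return, testing membership against a set built once instead of scanning the hidden list.
import Mathlib
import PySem

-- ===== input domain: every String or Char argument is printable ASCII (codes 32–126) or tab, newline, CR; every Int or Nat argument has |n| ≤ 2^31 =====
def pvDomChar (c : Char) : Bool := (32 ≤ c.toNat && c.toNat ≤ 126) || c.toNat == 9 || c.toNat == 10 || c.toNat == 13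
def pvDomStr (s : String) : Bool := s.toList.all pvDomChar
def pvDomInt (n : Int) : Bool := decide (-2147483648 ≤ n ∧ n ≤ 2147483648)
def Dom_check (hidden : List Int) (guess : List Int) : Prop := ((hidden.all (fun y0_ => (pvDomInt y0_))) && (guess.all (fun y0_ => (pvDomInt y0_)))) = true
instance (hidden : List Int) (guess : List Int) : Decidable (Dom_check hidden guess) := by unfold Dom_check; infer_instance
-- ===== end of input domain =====

-- B replaces A's iterative range(3) loop by a structural recursion over the list heads
-- that combines the counts back-to-front, with membership against a set built once (alternative decomposition).


-- ===== PORT A =====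
def check (hidden : List Int) (guess : List Int) : Int × Int :=
  (PySem.List.pyRange 0 3 1).foldl (fun (s : Int × Int) i =>
    if PySem.List.pyGetD hidden i 0 = PySem.List.pyGetD guess i 0 then (s.1 + 1, s.2)
    else if PySem.List.pyGetD guess i 0 ∈ hidden then (s.1, s.2 + 1)
    else s) (0, 0)

-- ===== PORT B =====
-- helper 'go' of Source B: recursion on k, combining the front pair after the recursive call returns
def checkGo (hset : PySem.Set Int) : List Int → List Int → Nat → Int × Int
  | _, _, 0 => (0, 0)
  | hs, gs, k + 1 =>
    let p := checkGo hset (PySem.List.slice hs (some 1) none) (PySem.List.slice gs (some 1) none) k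
    if PySem.List.pyGetD hs 0 0 = PySem.List.pyGetD gs 0 0 then (p.1 + 1, p.2)
    else if PySem.Set.contains hset (PySem.List.pyGetD gs 0 0) then (p.1, p.2 + 1)
    else p

def check_alt (hidden : List Int) (guess : List Int) : Int × Int :=
  checkGo (PySem.Set.ofList hidden) hidden guess 3

-- ===== PRECONDITION & SPEC =====
-- Pre_: Python A indexes hidden[i] and guess[i] for i = 0,1,2, raising IndexError on shorter lists.
def Pre_check (hidden : List Int) (guess : List Int) : Prop := 3 ≤ hidden.length ∧ 3 ≤ guess.length
instance (hidden : List Int) (guess : List Int) : Decidable (Pre_check hidden guess) := by unfold Pre_check; infer_instance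
def pvWitness_check : List Int × List Int := ([1, 2, 3], [3, 2, 5])
def Spec_check (hidden : List Int) (guess : List Int) (out : Int × Int) : Prop := out = check_alt hidden guess
instance (hidden : List Int) (guess : List Int) (out : Int × Int) : Decidable (Spec_check hidden guess out) := by unfold Spec_check; infer_instance

-- ===== CLAIM (what is proved, stated in full; the proofs are below) =====
def Claim_equal_check : Prop := ∀ (hidden : List Int) (guess : List Int), Dom_check hidden guess → Pre_check hidden guess → Spec_check hidden guess (check hidden guess)

-- ===== LEMMAS AND PROOFS =====
theorem pyRange03 : PySem.List.pyRange 0 3 1 = [0, 1, 2] := by decide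

theorem getD_one (a b : Int) (l : List Int) : PySem.List.pyGetD (a :: b :: l) 1 0 = b := by
  simp [PySem.List.pyGetD, PySem.List.pyIdx?, PySem.List.pyGet?]

theorem getD_two (a b c : Int) (l : List Int) : PySem.List.pyGetD (a :: b :: c :: l) 2 0 = c := by
  simp [PySem.List.pyGetD, PySem.List.pyIdx?, PySem.List.pyGet?]
  rw [if_pos (by omega)]; simp

-- ===== VERDICT =====
theorem check_spec : Claim_equal_check := by
  intro hidden guess _ hpre
  unfold Spec_check check check_alt
  obtain ⟨h1, h2⟩ := hpre
  match hidden, guess with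
  | a :: b :: c :: hr, x :: y :: z :: gr =>
    rw [pyRange03]
    simp only [List.foldl, checkGo, PySem.List.slice_from_one, List.tail_cons,
      PySem.List.pyGetD_zero_cons, getD_one, getD_two]
    simp only [PySem.Set.contains_iff, PySem.Set.mem_ofList]
    split_ifs <;> rfl
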